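-- pv_equiv track=rewrite | github.com/gabz11/CodigosBCC-2021 | Python/Trabalho - Sist. Ciber-físicos/Calculadora Base/main.py | BiParaHex
-- ===== SOURCE A (Python) =====
-- def BiParaHex(x):
--     x = str(x)
--     novo_numero = ""
--     lista = []
--     prompt = len(x)
--     while prompt % 4 != 0:
--         lista.append("0")
--         prompt = prompt + 1
--     for i in x:
--         lista.append(i)
--     for i in range(0, len(lista) - 1, 4):
--         if lista[i] == "0":
--             if lista[i + 1] == "0":
--                 if lista[i + 2] == "0":
--                     if lista[i + 3] == "0":
--                         novo_numero = novo_numero + "0"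
--                     else:
--                         novo_numero = novo_numero + "1"
--                 else:
--                     if lista[i + 3] == "0":
--                         novo_numero = novo_numero + "2"
--                     else:
--                         novo_numero = novo_numero + "3"
--             else:
--                 if lista[i + 2] == "0":
--                     if lista[i + 3] == "0":
--                         novo_numero = novo_numero + "4"
--                     else:
--                         novo_numero = novo_numero + "5"
--                 else:
--                     if lista[i + 3] == "0":
--                         novo_numero = novo_numero + "6"
--                     else:
--                         novo_numero = novo_numero + "7"
--         else:
--             if lista[i + 1] == "0":
--                 if lista[i + 2] == "0":
--                     if lista[i + 3] == "0":
--                         novo_numero = novo_numero + "8"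
--                     else:
--                         novo_numero = novo_numero + "9"
--                 else:
--                     if lista[i + 3] == "0":
--                         novo_numero = novo_numero + "A"
--                     else:
--                         novo_numero = novo_numero + "B"
--             else:
--                 if lista[i + 2] == "0":
--                     if lista[i + 3] == "0":
--                         novo_numero = novo_numero + "C"
--                     else:
--                         novo_numero = novo_numero + "D"
--                 else:
--                     if lista[i + 3] == "0":
--                         novo_numero = novo_numero + "E"
--                     else:
--                         novo_numero = novo_numero + "F"
--
--     return novo_numero
-- ===== SOURCE B (Python) =====
-- def BiParaHex(x):
--     x = str(x)
--     table = "0123456789ABCDEF"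
--     s = "0" * ((-len(x)) % 4) + x
--     out = []
--     for i in range(0, len(s), 4):
--         v = 0
--         for ch in s[i:i+4]:
--             v = v * 2 + (0 if ch == "0" else 1)
--         out.append(table[v])
--     return "".join(out)
-- ===== Notes on version B (the rewrite author's own statement) =====
-- stated objective: simpler
-- what changed: Replaces the 16-way nested if-chain over an index loop on a padded list with a 16-entry hex lookup table indexed by a value folded from each 4-char group (any non-'0' char counts as 1, as in A), collecting chars and joining at the end.
import Mathlib
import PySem

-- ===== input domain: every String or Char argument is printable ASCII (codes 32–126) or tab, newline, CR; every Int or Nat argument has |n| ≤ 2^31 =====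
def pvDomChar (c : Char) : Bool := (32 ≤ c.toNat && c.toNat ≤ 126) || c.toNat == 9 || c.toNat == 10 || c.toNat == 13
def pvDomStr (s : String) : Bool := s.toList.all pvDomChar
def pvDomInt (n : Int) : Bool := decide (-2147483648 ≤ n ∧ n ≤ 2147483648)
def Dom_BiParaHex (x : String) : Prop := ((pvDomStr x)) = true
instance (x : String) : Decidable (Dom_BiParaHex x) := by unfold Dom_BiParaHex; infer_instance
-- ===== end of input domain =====

-- B replaces A's 16-way nested if-chain with a 16-entry hex lookup table indexed by a
-- value folded from each 4-char group (simpler decomposition; same behaviour, same cost).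


-- ===== PORT A =====
-- while prompt % 4 != 0: lista.append("0"); prompt += 1
def padLoop (prompt : Nat) (lista : List Char) : List Char :=
  if prompt % 4 ≠ 0 then padLoop (prompt + 1) (lista ++ ['0']) else lista
  termination_by (4 - prompt % 4) % 4
  decreasing_by omega

-- the body of A's for-loop over range(0, len(lista)-1, 4): nested ifs on lista[i..i+3]
def biStep (lista : List Char) (novo_numero : String) (i : Int) : String :=
  if PySem.List.pyGetD lista i ' ' = '0' then
    if PySem.List.pyGetD lista (i + 1) ' ' = '0' then
      if PySem.List.pyGetD lista (i + 2) ' ' = '0' then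
        if PySem.List.pyGetD lista (i + 3) ' ' = '0' then novo_numero ++ "0" else novo_numero ++ "1"
      else
        if PySem.List.pyGetD lista (i + 3) ' ' = '0' then novo_numero ++ "2" else novo_numero ++ "3"
    else
      if PySem.List.pyGetD lista (i + 2) ' ' = '0' then
        if PySem.List.pyGetD lista (i + 3) ' ' = '0' then novo_numero ++ "4" else novo_numero ++ "5"
      else
        if PySem.List.pyGetD lista (i + 3) ' ' = '0' then novo_numero ++ "6" else novo_numero ++ "7"
  else
    if PySem.List.pyGetD lista (i + 1) ' ' = '0' then
      if PySem.List.pyGetD lista (i + 2) ' ' = '0' then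
        if PySem.List.pyGetD lista (i + 3) ' ' = '0' then novo_numero ++ "8" else novo_numero ++ "9"
      else
        if PySem.List.pyGetD lista (i + 3) ' ' = '0' then novo_numero ++ "A" else novo_numero ++ "B"
    else
      if PySem.List.pyGetD lista (i + 2) ' ' = '0' then
        if PySem.List.pyGetD lista (i + 3) ' ' = '0' then novo_numero ++ "C" else novo_numero ++ "D"
      else
        if PySem.List.pyGetD lista (i + 3) ' ' = '0' then novo_numero ++ "E" else novo_numero ++ "F"

def BiParaHex (x : String) : String :=
  let xs := x.toList
  let lista := xs.foldl (fun l c => l ++ [c]) (padLoop xs.length [])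
  (PySem.List.pyRange 0 ((lista.length : Int) - 1) 4).foldl (biStep lista) ""

-- ===== PORT B =====
def hexTable : List Char := "0123456789ABCDEF".toList

def bit01 (c : Char) : Nat := if c = '0' then 0 else 1

-- the outer loop of B: one table char per 4-char group
def chunks : List Char → List Char
  | a :: b :: c :: d :: rest =>
      hexTable.getD ((((0 * 2 + bit01 a) * 2 + bit01 b) * 2 + bit01 c) * 2 + bit01 d) ' ' :: chunks rest
  | _ => []

def BiParaHex_alt (x : String) : String :=
  let xs := x.toList
  -- "0" * ((-len(x)) % 4) + x   (Python mod: result in [0,4))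
  let s := List.replicate (PySem.Int.mod (-(xs.length : Int)) 4).toNat '0' ++ xs
  String.ofList (chunks s)

-- ===== PRECONDITION & SPEC =====
def Spec_BiParaHex (x : String) (out : String) : Prop := out = BiParaHex_alt x
instance (x : String) (out : String) : Decidable (Spec_BiParaHex x out) := by unfold Spec_BiParaHex; infer_instance

-- ===== CLAIM (what is proved, stated in full; the proofs are below) =====
def Claim_equal_BiParaHex : Prop := ∀ (x : String), Dom_BiParaHex x → Spec_BiParaHex x (BiParaHex x)

-- ===== LEMMAS AND PROOFS =====

lemma padLoop_eq (n : Nat) (l : List Char) :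
    padLoop n l = l ++ List.replicate ((4 - n % 4) % 4) '0' := by
  fun_induction padLoop n l with
  | case1 n l h ih =>
      rw [ih]
      have : (4 - n % 4) % 4 = (4 - (n + 1) % 4) % 4 + 1 := by omega
      rw [this, List.replicate_succ]
      simp
  | case2 n l h =>
      have : (4 - n % 4) % 4 = 0 := by omega
      simp [this]

lemma foldl_snoc (xs : List Char) (init : List Char) :
    xs.foldl (fun l c => l ++ [c]) init = init ++ xs := by
  induction xs generalizing init with
  | nil => simp
  | cons a t ih => simp [List.foldl, ih, List.append_assoc]

lemma pyRange4_cons (a b : Int) (h : a < b) :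
    PySem.List.pyRange a b 4 = a :: PySem.List.pyRange (a + 4) b 4 := by
  rw [PySem.List.pyRange_of_pos a b (by norm_num),
      PySem.List.pyRange_of_pos (a + 4) b (by norm_num)]
  have hn : ((b - a + 4 - 1) / 4).toNat
      = (if a + 4 < b then ((b - (a + 4) + 4 - 1) / 4).toNat else 0) + 1 := by
    split_ifs with h4 <;> omega
  simp only [h, if_pos, hn, List.range_succ_eq_map, List.map_cons, List.map_map]
  congr 1
  · simp
  · apply List.map_congr_left
    intro k _
    simp [Function.comp]
    ring

lemma pyGetD_prefix (pre l : List Char) (j : Nat) (_hj : j < l.length) :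
    PySem.List.pyGetD (pre ++ l) ((pre.length : Int) + (j : Int)) ' ' = l.getD j ' ' := by
  have : (pre.length : Int) + (j : Int) = ((pre.length + j : Nat) : Int) := by push_cast; ring
  rw [this, PySem.List.pyGetD_natCast]
  simp [List.getD, List.getElem?_append_right (by omega : pre.length ≤ pre.length + j)]

lemma key (l : List Char) (h : l.length % 4 = 0) :
    ∀ (pre : List Char) (acc : String),
      (PySem.List.pyRange (pre.length : Int) ((pre.length : Int) + (l.length : Int) - 1) 4).foldl
          (biStep (pre ++ l)) acc
        = acc ++ String.ofList (chunks l) := by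
  fun_induction chunks l with
  | case1 a b c d rest ih =>
      intro pre acc
      have hr : rest.length % 4 = 0 := by simp at h; omega
      have hlt : (pre.length : Int) < (pre.length : Int) + ((a :: b :: c :: d :: rest).length : Int) - 1 := by
        simp; omega
      rw [pyRange4_cons _ _ hlt]
      rw [List.foldl_cons]
      have hstep : biStep (pre ++ a :: b :: c :: d :: rest) acc (pre.length : Int)
          = acc ++ String.ofList [hexTable.getD ((((0 * 2 + bit01 a) * 2 + bit01 b) * 2 + bit01 c) * 2 + bit01 d) ' '] := by
        have g0 := pyGetD_prefix pre (a :: b :: c :: d :: rest) 0 (by simp)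
        have g1 := pyGetD_prefix pre (a :: b :: c :: d :: rest) 1 (by simp)
        have g2 := pyGetD_prefix pre (a :: b :: c :: d :: rest) 2 (by simp)
        have g3 := pyGetD_prefix pre (a :: b :: c :: d :: rest) 3 (by simp)
        simp only [Int.natCast_zero, add_zero] at g0
        unfold biStep
        rw [g0]
        rw [show (pre.length : Int) + 1 = (pre.length : Int) + (1 : Nat) by push_cast; ring, g1]
        rw [show (pre.length : Int) + 2 = (pre.length : Int) + (2 : Nat) by push_cast; ring, g2]
        rw [show (pre.length : Int) + 3 = (pre.length : Int) + (3 : Nat) by push_cast; ring, g3]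
        by_cases ha : a = '0' <;> by_cases hb : b = '0' <;> by_cases hc : c = '0' <;> by_cases hd : d = '0' <;>
          simp [ha, hb, hc, hd, bit01, hexTable, List.getD]
      rw [hstep]
      have harg : (pre.length : Int) + 4 = (((pre ++ [a, b, c, d]).length : Nat) : Int) := by
        simp
      have hlist : pre ++ a :: b :: c :: d :: rest = (pre ++ [a, b, c, d]) ++ rest := by simp
      have hend : (pre.length : Int) + ((a :: b :: c :: d :: rest).length : Int) - 1
          = (((pre ++ [a, b, c, d]).length : Nat) : Int) + (rest.length : Int) - 1 := by
        simp
        omega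
      rw [harg, hlist, hend, ih hr]
      rw [String.append_assoc, ← String.ofList_append]
      rfl
  | case2 l h2 =>
      intro pre acc
      match l, h, h2 with
      | [], _, _ =>
          rw [PySem.List.pyRange_of_pos _ _ (by norm_num)]
          simp
      | [a], h, _ => simp at h
      | [a, b], h, _ => simp at h
      | [a, b, c], h, _ => simp at h
      | a :: b :: c :: d :: r, _, h2 => exact absurd rfl (h2 a b c d r)

-- ===== VERDICT (by name: the statement is the Claim_ definition above) =====
theorem BiParaHex_spec : Claim_equal_BiParaHex := by
  intro x _
  unfold Spec_BiParaHex BiParaHex BiParaHex_alt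
  simp only [foldl_snoc, padLoop_eq, List.nil_append]
  have hk : (PySem.Int.mod (-(x.toList.length : Int)) 4).toNat
      = (4 - x.toList.length % 4) % 4 := by
    rw [PySem.Int.mod_eq_emod_of_pos (by norm_num)]
    omega
  rw [hk]
  set s := List.replicate ((4 - x.toList.length % 4) % 4) '0' ++ x.toList with hs
  have hlen : s.length % 4 = 0 := by
    simp [hs]
    omega
  have hkey := key s hlen [] ""
  simp only [List.nil_append, List.length_nil, Int.natCast_zero, zero_add] at hkey
  rw [hkey]
  rfl
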